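-- pv_equiv track=rewrite | github.com/880plesalexandru-ship-it/song-to-slides | add_symbols_to_word.py | _genereaza_ordine_display
-- ===== SOURCE A (Python) =====
-- def _genereaza_ordine_display(elemente):
--     """
--     Generează ordinea de afișare (performanță) cu reguli de intercalare:
--       - 0 refrene → doar strofe
--       - 1 refren → R (fără număr), repetat după fiecare strofă
--       - mai multe refrene, dar mai puține decât strofele →
--           R1 apare (nr_strofe - nr_refrene + 1) ori, apoi R2, R3... câte o dată
--       - mai multe/egale refrene vs strofe → ordinea fizică
--     """
--     stanzas = [e for e in elemente if e["tip"] == "strofa"]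
--     choruses = [e for e in elemente if e["tip"] == "refren"]
--     num_s = len(stanzas)
--     num_r = len(choruses)
--
--     if num_r == 0:
--         return [f"S{i+1}" for i in range(num_s)]
--
--     if num_s == 0:
--         if num_r == 1:
--             return ["R"]
--         return [f"R{i+1}" for i in range(num_r)]
--
--     starts_with_chorus = elemente[0]["tip"] == "refren"
--
--     if num_r == 1:
--         # Singur refren → "R" după fiecare strofă
--         ordine = []
--         if starts_with_chorus:
--             ordine.append("R")
--         for i in range(num_s):
--             ordine.append(f"S{i+1}")
--             ordine.append("R")
--         return ordine
--
--     if num_r >= num_s: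
--         # Mai multe refrene decât strofe → ordinea fizică
--         idx_s = idx_r = 0
--         ordine = []
--         for e in elemente:
--             if e["tip"] == "strofa":
--                 idx_s += 1
--                 ordine.append(f"S{idx_s}")
--             else:
--                 idx_r += 1
--                 ordine.append(f"R{idx_r}")
--         return ordine
--
--     # Mai multe strofe decât refrene → R1 se repetă
--     r1_total = num_s - num_r + 1
--     ordine = []
--     if starts_with_chorus:
--         ordine.append("R1")
--         r1_total = max(0, r1_total - 1)
--
--     r1_used = 0
--     r_next = 2
--     for i in range(num_s):
--         ordine.append(f"S{i+1}")
--         if r1_used < r1_total: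
--             ordine.append("R1")
--             r1_used += 1
--         elif r_next <= num_r:
--             ordine.append(f"R{r_next}")
--             r_next += 1
--
--     return ordine
-- ===== SOURCE B (Python) =====
-- def _genereaza_ordine_display(elemente):
--     tips = [e["tip"] for e in elemente]
--     num_s = tips.count("strofa")
--     num_r = tips.count("refren")
--
--     if num_r == 0:
--         return ["S%d" % (i + 1) for i in range(num_s)]
--     if num_s == 0:
--         return ["R"] if num_r == 1 else ["R%d" % (i + 1) for i in range(num_r)]
--
--     if num_r > 1 and num_r >= num_s:
--         # physical order: label each part by how many of its kind appeared so far
--         return [("S%d" % tips[: j + 1].count("strofa")) if t == "strofa"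
--                 else ("R%d" % (j + 1 - tips[: j + 1].count("strofa")))
--                 for j, t in enumerate(tips)]
--
--     # interleaving cases: compute the chorus schedule, then render uniformly
--     leading = tips[0] == "refren"
--     if num_r == 1:
--         lead = "R" if leading else None
--         sched = ["R"] * num_s
--     else:
--         lead = "R1" if leading else None
--         t = num_s - num_r + 1 - (1 if leading else 0)
--         sched = ["R1"] * t + ["R%d" % k for k in range(2, num_r + 1)]
--         sched += [None] * (num_s - len(sched))
--
--     out = [lead] if lead is not None else []
--     for i, c in enumerate(sched):
--         out.append("S%d" % (i + 1))
--         if c is not None: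
--             out.append(c)
--     return out
-- ===== Notes on version B (the rewrite author's own statement) =====
-- stated objective: alternative
-- what changed: B first computes a chorus schedule (the chorus label, if any, to emit after each stanza) plus a leading-chorus token from the counts, then renders everything in one uniform loop, and labels the physical-order case by per-position prefix counts instead of running counters; A interleaves counter bookkeeping and emission inside each branch.
import Mathlib
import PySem

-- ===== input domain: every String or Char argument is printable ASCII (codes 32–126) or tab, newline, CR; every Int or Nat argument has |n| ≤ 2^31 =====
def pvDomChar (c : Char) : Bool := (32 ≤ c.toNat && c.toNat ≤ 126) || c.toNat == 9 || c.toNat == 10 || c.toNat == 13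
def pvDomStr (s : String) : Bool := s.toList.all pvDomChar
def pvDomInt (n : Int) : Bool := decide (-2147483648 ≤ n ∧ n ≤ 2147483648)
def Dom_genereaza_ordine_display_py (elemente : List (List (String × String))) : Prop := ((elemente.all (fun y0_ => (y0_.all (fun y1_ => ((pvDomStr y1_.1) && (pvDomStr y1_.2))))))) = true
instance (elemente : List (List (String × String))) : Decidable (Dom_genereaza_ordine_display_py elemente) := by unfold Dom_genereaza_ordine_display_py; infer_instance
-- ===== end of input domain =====

-- B computes a chorus schedule first and then renders it in one uniform loop (alternative decomposition, same cost).

-- ===== PORT A =====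
-- the 'for i in range(num_s): append S; append R' loop of the single-chorus branch
def pyA_loop1 : List Int → List String → List String
  | [], ordine => ordine
  | i :: rest, ordine =>
      pyA_loop1 rest ((ordine ++ ["S" ++ PySem.Int.toStr (i + 1)]) ++ ["R"])

-- the physical-order loop with its two running counters
def pyA_phys : List (List (String × String)) → Int → Int → List String → List String
  | [], _, _, ordine => ordine
  | e :: rest, idx_s, idx_r, ordine =>
      if ((PySem.Dict.mk e).get? "tip").getD "" == "strofa" then
        pyA_phys rest (idx_s + 1) idx_r (ordine ++ ["S" ++ PySem.Int.toStr (idx_s + 1)])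
      else
        pyA_phys rest idx_s (idx_r + 1) (ordine ++ ["R" ++ PySem.Int.toStr (idx_r + 1)])

-- the final loop with the r1_used / r_next counters
def pyA_loop2 (r1_total numR : Int) : List Int → List String → Int → Int → List String
  | [], ordine, _, _ => ordine
  | i :: rest, ordine, r1_used, r_next =>
      let ord := ordine ++ ["S" ++ PySem.Int.toStr (i + 1)]
      if r1_used < r1_total then pyA_loop2 r1_total numR rest (ord ++ ["R1"]) (r1_used + 1) r_next
      else if r_next ≤ numR then
        pyA_loop2 r1_total numR rest (ord ++ ["R" ++ PySem.Int.toStr r_next]) r1_used (r_next + 1)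
      else pyA_loop2 r1_total numR rest ord r1_used r_next

def genereaza_ordine_display_py (elemente : List (List (String × String))) : List String :=
  let stanzas := elemente.filter (fun e => ((PySem.Dict.mk e).get? "tip").getD "" == "strofa")
  let choruses := elemente.filter (fun e => ((PySem.Dict.mk e).get? "tip").getD "" == "refren")
  let num_s := stanzas.length
  let num_r := choruses.length
  if num_r = 0 then
    (PySem.List.pyRange 0 num_s 1).map (fun i => "S" ++ PySem.Int.toStr (i + 1))
  else if num_s = 0 then
    if num_r = 1 then ["R"]
    else (PySem.List.pyRange 0 num_r 1).map (fun i => "R" ++ PySem.Int.toStr (i + 1))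
  else
    let starts_with_chorus := ((PySem.Dict.mk (elemente.headD [])).get? "tip").getD "" == "refren"
    if num_r = 1 then
      pyA_loop1 (PySem.List.pyRange 0 num_s 1) (if starts_with_chorus then ["R"] else [])
    else if num_r ≥ num_s then
      pyA_phys elemente 0 0 []
    else
      let r1_total : Int := (num_s : Int) - (num_r : Int) + 1
      let ordine : List String := if starts_with_chorus then ["R1"] else []
      let r1_total : Int := if starts_with_chorus then max 0 (r1_total - 1) else r1_total
      pyA_loop2 r1_total (num_r : Int) (PySem.List.pyRange 0 num_s 1) ordine 0 2

-- ===== PORT B =====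
-- the uniform render loop: emit S(i+1) and the scheduled chorus (if any) after it
def pyB_render : List (Int × Option String) → List String → List String
  | [], out => out
  | ic :: rest, out =>
      let out' := out ++ ["S" ++ PySem.Int.toStr (ic.1 + 1)]
      pyB_render rest (match ic.2 with | some c => out' ++ [c] | none => out')

def genereaza_ordine_display_py_alt (elemente : List (List (String × String))) : List String :=
  let tips := elemente.map (fun e => ((PySem.Dict.mk e).get? "tip").getD "")
  let num_s := tips.count "strofa"
  let num_r := tips.count "refren"
  if num_r = 0 then
    (PySem.List.pyRange 0 num_s 1).map (fun i => "S" ++ PySem.Int.toStr (i + 1))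
  else if num_s = 0 then
    if num_r = 1 then ["R"]
    else (PySem.List.pyRange 0 num_r 1).map (fun i => "R" ++ PySem.Int.toStr (i + 1))
  else if 1 < num_r ∧ num_s ≤ num_r then
    -- physical order: label each part by how many of its kind appeared so far
    (PySem.List.enumerate tips 0).map (fun jt =>
      if jt.2 == "strofa" then
        "S" ++ PySem.Int.toStr ((tips.take (jt.1.toNat + 1)).count "strofa")
      else
        "R" ++ PySem.Int.toStr (jt.1 + 1 - ((tips.take (jt.1.toNat + 1)).count "strofa" : Int)))
  else
    -- interleaving cases: compute the chorus schedule, then render uniformly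
    let leading := tips.headD "" == "refren"
    let ls : Option String × List (Option String) :=
      if num_r = 1 then
        ((if leading then some "R" else none), List.replicate num_s (some "R"))
      else
        let t : Nat := num_s - num_r + 1 - (if leading then 1 else 0)
        let s0 : List (Option String) :=
          List.replicate t (some "R1")
            ++ (PySem.List.pyRange 2 ((num_r : Int) + 1) 1).map (fun k => some ("R" ++ PySem.Int.toStr k))
        ((if leading then some "R1" else none), s0 ++ List.replicate (num_s - s0.length) none)
    pyB_render (PySem.List.enumerate ls.2 0) (match ls.1 with | some l => [l] | none => [])

-- ===== PRECONDITION & SPEC =====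
-- Pre_ excludes exactly the elements without a "tip" key, on which Python A raises KeyError.
def Pre_genereaza_ordine_display_py (elemente : List (List (String × String))) : Prop :=
  (elemente.all (fun e => e.any (fun p => p.1 == "tip"))) = true
instance (elemente : List (List (String × String))) : Decidable (Pre_genereaza_ordine_display_py elemente) := by
  unfold Pre_genereaza_ordine_display_py; infer_instance
def pvWitness_genereaza_ordine_display_py : (List (List (String × String))) :=
  [[("tip", "strofa")], [("tip", "refren")]]
def Spec_genereaza_ordine_display_py (elemente : List (List (String × String))) (out : List String) : Prop := out = genereaza_ordine_display_py_alt elemente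
instance (elemente : List (List (String × String))) (out : List String) : Decidable (Spec_genereaza_ordine_display_py elemente out) := by unfold Spec_genereaza_ordine_display_py; infer_instance

-- ===== CLAIM (what is proved, stated in full; the proofs are below) =====
def Claim_equal_genereaza_ordine_display_py : Prop := ∀ (elemente : List (List (String × String))), Dom_genereaza_ordine_display_py elemente → Pre_genereaza_ordine_display_py elemente → Spec_genereaza_ordine_display_py elemente (genereaza_ordine_display_py elemente)

-- ===== LEMMAS AND PROOFS =====

-- the tip accessor, named for the proofs (definitionally the inline lambda of both ports)
def pvTip (e : List (String × String)) : String := ((PySem.Dict.mk e).get? "tip").getD ""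

-- the chorus scheduled after stanza i (0-based) in the many-stanzas case
def schedOptSpec (t numR : Int) (i : Int) : Option String :=
  if i < t then some "R1"
  else if i - t + 2 ≤ numR then some ("R" ++ PySem.Int.toStr (i - t + 2))
  else none

theorem pv_lenFilt (el : List (List (String × String))) (v : String) :
    (el.filter (fun e => ((PySem.Dict.mk e).get? "tip").getD "" == v)).length
      = (el.map (fun e => ((PySem.Dict.mk e).get? "tip").getD "")).count v := by
  rw [← List.countP_eq_length_filter]
  simp [List.count_eq_countP, List.countP_map, Function.comp_def]

theorem pv_headD_map (el : List (List (String × String))) (h : el ≠ []) :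
    (el.map (fun e => ((PySem.Dict.mk e).get? "tip").getD "")).headD ""
      = ((PySem.Dict.mk (el.headD [])).get? "tip").getD "" := by
  cases el with
  | nil => exact absurd rfl h
  | cons a l => rfl

theorem pv_loop1_eq (l : List Int) (ord : List String) :
    pyA_loop1 l ord = ord ++ l.flatMap (fun i => ["S" ++ PySem.Int.toStr (i + 1), "R"]) := by
  induction l generalizing ord with
  | nil => simp [pyA_loop1]
  | cons i rest ih => simp [pyA_loop1, ih]

theorem pv_render_eq (l : List (Int × Option String)) (out : List String) :
    pyB_render l out
      = out ++ l.flatMap (fun ic => ("S" ++ PySem.Int.toStr (ic.1 + 1)) :: ic.2.toList) := by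
  induction l generalizing out with
  | nil => simp [pyB_render]
  | cons ic rest ih =>
      cases h : ic.2 <;> simp [pyB_render, h, ih]

theorem pv_phys_eq (rest : List (List (String × String))) :
    ∀ (pre : List (List (String × String))) (ord : List String),
    pyA_phys rest (((pre.map pvTip).count "strofa" : Nat) : Int)
        ((pre.length : Int) - ((pre.map pvTip).count "strofa" : Nat)) ord
      = ord ++ (PySem.List.enumerate (rest.map pvTip) (pre.length : Int)).map
          (fun jt =>
            if jt.2 == "strofa" then
              "S" ++ PySem.Int.toStr (((((pre ++ rest).map pvTip)).take (jt.1.toNat + 1)).count "strofa")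
            else
              "R" ++ PySem.Int.toStr (jt.1 + 1 - (((((pre ++ rest).map pvTip)).take (jt.1.toNat + 1)).count "strofa" : Int))) := by
  induction rest with
  | nil => intro pre ord; simp [pyA_phys, PySem.List.enumerate_nil]
  | cons e rest ih =>
      intro pre ord
      have htake : (((pre ++ e :: rest).map pvTip)).take ((pre.length : Int).toNat + 1)
          = pre.map pvTip ++ [pvTip e] := by
        rw [List.map_append]
        rw [show ((pre.length : Int).toNat + 1) = (pre.map pvTip).length + 1 by simp]
        rw [List.take_append]
        simp
      have hcnt : ((pre ++ [e]).map pvTip).count "strofa"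
          = (pre.map pvTip).count "strofa" + (if pvTip e == "strofa" then 1 else 0) := by
        simp [List.map_append, List.count_append, List.count_singleton]
      have hassoc : (pre ++ [e]) ++ rest = pre ++ e :: rest := by simp
      rw [List.map_cons, PySem.List.enumerate_cons, List.map_cons]
      rw [pyA_phys]
      by_cases hs : pvTip e == "strofa"
      · rw [if_pos (by simpa [pvTip] using hs)]
        have hthis := ih (pre ++ [e]) (ord ++ ["S" ++ PySem.Int.toStr ((((pre.map pvTip).count "strofa" : Nat) : Int) + 1)])
        rw [hcnt, hassoc] at hthis
        simp only [hs, if_true, List.length_append, List.length_cons, List.length_nil] at hthis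
        push_cast at hthis
        rw [htake]
        simp only [hs, if_true, List.count_append, List.count_singleton]
        rw [show ((pre.length : Int)) - (((pre.map pvTip).count "strofa" : Nat) : Int)
              = ((pre.length : Int) + 1) - ((((pre.map pvTip).count "strofa" : Nat) : Int) + 1) by ring]
        rw [hthis]
        simp [List.append_assoc]
      · rw [if_neg (by simpa [pvTip] using hs)]
        have hthis := ih (pre ++ [e]) (ord ++ ["R" ++ PySem.Int.toStr (((pre.length : Int) - (((pre.map pvTip).count "strofa" : Nat) : Int)) + 1)])
        rw [hcnt, hassoc] at hthis
        simp only [hs, if_false, Bool.false_eq_true, List.length_append, List.length_cons, List.length_nil, add_zero] at hthis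
        push_cast at hthis
        rw [htake]
        simp only [hs, if_false, Bool.false_eq_true, List.count_append, List.count_singleton, add_zero]
        rw [show (pre.length : Int) + 1 - (((pre.map pvTip).count "strofa" : Nat) : Int)
              = ((pre.length : Int) - (((pre.map pvTip).count "strofa" : Nat) : Int)) + 1 by ring] at hthis ⊢
        rw [hthis]
        simp [List.append_assoc]

theorem pv_loop2_eq (t numR : Int) (_ht : 0 ≤ t) (hnR : 1 ≤ numR) (n : Nat) :
    ∀ (s : Int), 0 ≤ s → ∀ (ord : List String),
    pyA_loop2 t numR (PySem.List.pyRange s (s + n) 1) ord (min s t)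
        (min (2 + max 0 (s - t)) (numR + 1))
      = ord ++ (PySem.List.pyRange s (s + n) 1).flatMap
          (fun i => ("S" ++ PySem.Int.toStr (i + 1)) :: (schedOptSpec t numR i).toList) := by
  induction n with
  | zero => intro s hs ord; simp [pyA_loop2]
  | succ m ih =>
      intro s hs ord
      rw [PySem.List.pyRange_one_cons (by push_cast; omega)]
      rw [pyA_loop2]
      have hrec : s + ((m + 1 : Nat) : Int) = (s + 1) + (m : Nat) := by push_cast; ring
      by_cases hlt : s < t
      · rw [if_pos (by omega : min s t < t)]
        have h1 : min s t + 1 = min (s + 1) t := by omega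
        have h2 : min (2 + max 0 (s - t)) (numR + 1) = min (2 + max 0 (s + 1 - t)) (numR + 1) := by omega
        rw [h1, h2, hrec, ih (s+1) (by omega)]
        simp [schedOptSpec, if_pos hlt, List.append_assoc]
      · rw [if_neg (by omega : ¬ min s t < t)]
        by_cases hle : s - t + 2 ≤ numR
        · rw [if_pos (by omega : min (2 + max 0 (s - t)) (numR + 1) ≤ numR)]
          have h1 : min s t = min (s + 1) t := by omega
          have h2 : min (2 + max 0 (s - t)) (numR + 1) + 1 = min (2 + max 0 (s + 1 - t)) (numR + 1) := by omega
          have h3 : min (2 + max 0 (s - t)) (numR + 1) = s - t + 2 := by omega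
          rw [h3, h1]
          have h2' : s - t + 2 + 1 = min (2 + max 0 (s + 1 - t)) (numR + 1) := by omega
          rw [h2', hrec, ih (s+1) (by omega)]
          simp [schedOptSpec, if_neg (by omega : ¬ s < t), if_pos hle, List.append_assoc]
        · rw [if_neg (by omega : ¬ min (2 + max 0 (s - t)) (numR + 1) ≤ numR)]
          have h1 : min s t = min (s + 1) t := by omega
          have h2 : min (2 + max 0 (s - t)) (numR + 1) = min (2 + max 0 (s + 1 - t)) (numR + 1) := by omega
          rw [h1, h2, hrec, ih (s+1) (by omega)]
          simp [schedOptSpec, if_neg (by omega : ¬ s < t), if_neg hle, List.append_assoc]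

theorem pv_enum_map_flat (n : Nat) (f : Int → Option String) (g : Int × Option String → List String) :
    (PySem.List.enumerate ((PySem.List.pyRange 0 (n : Int) 1).map f) 0).flatMap g
      = (PySem.List.pyRange 0 (n : Int) 1).flatMap (fun i => g (i, f i)) := by
  induction n with
  | zero => simp [PySem.List.enumerate_nil]
  | succ m ih =>
      have h1 : ((m + 1 : Nat) : Int) = (m : Int) + 1 := by push_cast; ring
      rw [h1, PySem.List.pyRange_one_succ_right (by positivity)]
      rw [List.map_append, PySem.List.enumerate_append, List.flatMap_append, List.flatMap_append, ih]
      simp [PySem.List.enumerate_cons, PySem.List.enumerate_nil, PySem.List.length_pyRange_one]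

theorem pv_replicate_map (n : Nat) (x : Option String) :
    List.replicate n x = (PySem.List.pyRange 0 (n : Int) 1).map (fun _ => x) := by
  rw [List.map_const']
  simp [PySem.List.length_pyRange_one]

theorem pv_sched_eq (nS nR : Nat) (lead : Bool) (h2 : 2 ≤ nR) (hlt : nR < nS) :
    (List.replicate (nS - nR + 1 - (if lead then 1 else 0)) (some "R1")
        ++ (PySem.List.pyRange 2 ((nR : Int) + 1) 1).map (fun k => some ("R" ++ PySem.Int.toStr k)))
      ++ List.replicate (nS - ((nS - nR + 1 - (if lead then 1 else 0)) + (nR - 1))) (none : Option String)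
    = (PySem.List.pyRange 0 (nS : Int) 1).map
        (schedOptSpec ((nS : Int) - (nR : Int) + 1 - (if lead then 1 else 0)) (nR : Int)) := by
  set t' : Nat := nS - nR + 1 - (if lead then 1 else 0) with ht'
  have htval : ((nS : Int) - (nR : Int) + 1 - (if lead then 1 else 0)) = (t' : Nat) := by
    cases lead <;> simp [ht'] <;> omega
  rw [htval]
  have hlenR : ((PySem.List.pyRange 2 ((nR : Int) + 1) 1).map (fun k => some ("R" ++ PySem.Int.toStr k))).length = nR - 1 := by
    simp [PySem.List.length_pyRange_one]; omega
  have ht'le : t' + (nR - 1) ≤ nS := by cases lead <;> simp [ht'] <;> omega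
  apply List.ext_getElem
  · simp [hlenR, PySem.List.length_pyRange_one]
    omega
  · intro j hj1 hj2
    have hjS : j < nS := by
      simp only [List.length_append, List.length_replicate, hlenR] at hj1
      omega
    rw [List.getElem_map, PySem.List.getElem_pyRange_one]
    by_cases hj : j < t'
    · rw [List.getElem_append_left (by simp [List.length_replicate, hlenR]; omega)]
      rw [List.getElem_append_left (by simp [List.length_replicate]; omega)]
      rw [List.getElem_replicate]
      rw [schedOptSpec, if_pos (by omega)]
    · by_cases hj' : j < t' + (nR - 1)
      · rw [List.getElem_append_left (by simp [List.length_replicate, hlenR]; omega)]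
        rw [List.getElem_append_right (by simp [List.length_replicate]; omega)]
        rw [List.getElem_map, PySem.List.getElem_pyRange_one]
        rw [schedOptSpec, if_neg (by omega), if_pos (by simp; omega)]
        congr 2
        simp [List.length_replicate]
        congr 1
        omega
      · rw [List.getElem_append_right (by simp [List.length_replicate, hlenR]; omega)]
        rw [List.getElem_replicate]
        rw [schedOptSpec, if_neg (by omega), if_neg (by omega)]

theorem pv_main : ∀ (elemente : List (List (String × String))),
    genereaza_ordine_display_py elemente = genereaza_ordine_display_py_alt elemente := by
  intro el
  unfold genereaza_ordine_display_py genereaza_ordine_display_py_alt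
  simp only []
  rw [pv_lenFilt el "strofa", pv_lenFilt el "refren"]
  set tips := el.map (fun e => ((PySem.Dict.mk e).get? "tip").getD "") with htips
  set nS := tips.count "strofa" with hnS
  set nR := tips.count "refren" with hnR
  by_cases hr0 : nR = 0
  · simp [hr0]
  by_cases hs0 : nS = 0
  · simp [hr0, hs0]
  -- el is nonempty since nS ≠ 0
  have hne : el ≠ [] := by
    intro h; rw [h] at htips; simp [htips] at hnS; exact hs0 hnS
  have hhd : tips.headD "" = ((PySem.Dict.mk (el.headD [])).get? "tip").getD "" :=
    pv_headD_map el hne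
  rw [if_neg hr0, if_neg hr0, if_neg hs0, if_neg hs0]
  by_cases hr1 : nR = 1
  · rw [if_pos hr1, if_neg (by omega : ¬ (1 < nR ∧ nS ≤ nR)), if_pos hr1]
    rw [pv_loop1_eq, pv_render_eq, pv_replicate_map, pv_enum_map_flat]
    rw [hhd]
    cases hsw : (((PySem.Dict.mk (el.headD [])).get? "tip").getD "" == "refren") <;>
      simp
  rw [if_neg hr1, if_neg hr1]
  have h2 : 2 ≤ nR := by omega
  by_cases hge : nS ≤ nR
  · rw [if_pos (by omega : nR ≥ nS), if_pos (by exact ⟨by omega, hge⟩)]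
    have := pv_phys_eq el [] []
    simp only [List.map_nil, List.count_nil, List.length_nil, sub_zero,
      List.nil_append, CharP.cast_eq_zero] at this
    exact this
  · rw [if_neg (by omega : ¬ nR ≥ nS), if_neg (by omega : ¬ (1 < nR ∧ nS ≤ nR))]
    have hlt : nR < nS := by omega
    rw [hhd]
    set lead := (((PySem.Dict.mk (el.headD [])).get? "tip").getD "" == "refren") with hlead
    -- A's adjusted r1_total equals the closed form
    have htval : (if lead = true then max 0 ((nS : Int) - (nR : Int) + 1 - 1) else (nS : Int) - (nR : Int) + 1)
        = ((nS : Int) - (nR : Int) + 1 - (if lead = true then 1 else 0)) := by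
      cases lead <;> simp <;> omega
    rw [htval]
    set t : Int := (nS : Int) - (nR : Int) + 1 - (if lead = true then 1 else 0) with ht
    have ht0 : 0 ≤ t := by rw [ht]; cases lead <;> simp <;> omega
    have hloop := pv_loop2_eq t (nR : Int) ht0 (by omega : (1:Int) ≤ nR) nS 0 le_rfl
      (if lead = true then ["R1"] else [])
    rw [show min (0:Int) t = 0 from min_eq_left ht0,
        show min (2 + max 0 ((0:Int) - t)) ((nR : Int) + 1) = 2 by omega,
        zero_add] at hloop
    rw [hloop, pv_render_eq]
    -- the schedule list is the pointwise schedOptSpec table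
    have hlen : ((PySem.List.pyRange 2 ((nR : Int) + 1) 1).map (fun k => some ("R" ++ PySem.Int.toStr k))).length = nR - 1 := by
      simp [PySem.List.length_pyRange_one]; omega
    rw [List.length_append, List.length_replicate, hlen]
    rw [pv_sched_eq nS nR lead h2 hlt, pv_enum_map_flat]
    rw [ht]
    cases lead <;> simp

-- ===== VERDICT (by name: the statement is the Claim_ definition above) =====
theorem genereaza_ordine_display_py_spec : Claim_equal_genereaza_ordine_display_py := by
  intro el _ _
  unfold Spec_genereaza_ordine_display_py
  exact pv_main el
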